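-- pv_equiv track=rewrite | github.com/SANGHATI23/crispr-mdr-resensitization | scripts/run_sscrispr_proxy.py | homopolymer_penalty
-- ===== SOURCE A (Python) =====
-- def homopolymer_penalty(seq):
--     penalties = 0
--     for base in "ATGC":
--         if base * 4 in seq:
--             penalties += 10
--         if base * 5 in seq:
--             penalties += 20
--     return penalties
-- ===== SOURCE B (Python) =====
-- def homopolymer_penalty(seq):
--     # one left-to-right pass: record the maximal consecutive run length per character
--     best = {}
--     prev = None
--     run = 0
--     for ch in seq:
--         run = run + 1 if ch == prev else 1
--         prev = ch
--         if run > best.get(ch, 0):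
--             best[ch] = run
--     penalties = 0
--     for base in "ATGC":
--         m = best.get(base, 0)
--         if m >= 4:
--             penalties += 10
--         if m >= 5:
--             penalties += 20
--     return penalties
-- ===== Notes on version B (the rewrite author's own statement) =====
-- stated objective: alternative
-- what changed: Replaced the eight substring-containment scans ('AAAA' in seq etc.) by a single left-to-right run-length pass that records each character's maximal consecutive run, followed by threshold tests per base.
import Mathlib
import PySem

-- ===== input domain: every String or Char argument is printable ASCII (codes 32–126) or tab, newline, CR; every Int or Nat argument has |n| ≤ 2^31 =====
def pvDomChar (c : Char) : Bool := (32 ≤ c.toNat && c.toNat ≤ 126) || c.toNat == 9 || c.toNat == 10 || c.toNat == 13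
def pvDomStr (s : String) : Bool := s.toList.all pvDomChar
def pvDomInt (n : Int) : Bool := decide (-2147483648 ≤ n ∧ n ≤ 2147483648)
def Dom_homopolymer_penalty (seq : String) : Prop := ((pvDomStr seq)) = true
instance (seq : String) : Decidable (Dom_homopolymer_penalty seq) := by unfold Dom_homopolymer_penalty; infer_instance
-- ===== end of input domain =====

-- B replaces A's eight substring scans by one run-length pass per the whole string; objective: alternative decomposition (same asymptotic cost).

-- ===== PORT A =====
-- 'base * 4' is ported exactly as the 4-fold character repetition String.ofList (List.replicate 4 base)
def homopolymer_penalty (seq : String) : Int :=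
  "ATGC".toList.foldl (fun penalties base =>
    let p1 := if PySem.Str.isIn (String.ofList (List.replicate 4 base)) seq then penalties + 10 else penalties
    if PySem.Str.isIn (String.ofList (List.replicate 5 base)) seq then p1 + 20 else p1) 0

-- ===== PORT B =====
-- the 'for ch in seq' loop of Source B, carrying (best, prev, run)
def hpAltLoop (best : PySem.Dict Char Int) (prev : Option Char) (run : Int) :
    List Char → PySem.Dict Char Int
  | [] => best
  | x :: xs =>
      let run' := if some x = prev then run + 1 else 1
      let best' := if run' > best.getD x 0 then best.insert x run' else best
      hpAltLoop best' (some x) run' xs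

def homopolymer_penalty_alt (seq : String) : Int :=
  let best := hpAltLoop PySem.Dict.empty none 0 seq.toList
  "ATGC".toList.foldl (fun penalties base =>
    let m := best.getD base 0
    let p1 := if m ≥ 4 then penalties + 10 else penalties
    if m ≥ 5 then p1 + 20 else p1) 0

-- ===== PRECONDITION & SPEC =====
def Spec_homopolymer_penalty (seq : String) (out : Int) : Prop := out = homopolymer_penalty_alt seq
instance (seq : String) (out : Int) : Decidable (Spec_homopolymer_penalty seq out) := by unfold Spec_homopolymer_penalty; infer_instance

-- ===== CLAIM (what is proved, stated in full; the proofs are below) =====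
def Claim_equal_homopolymer_penalty : Prop := ∀ (seq : String), Dom_homopolymer_penalty seq → Spec_homopolymer_penalty seq (homopolymer_penalty seq)

-- ===== LEMMAS AND PROOFS =====

-- length of the leading run of c
def leadRun (c : Char) : List Char → Nat
  | [] => 0
  | x :: xs => if x = c then leadRun c xs + 1 else 0

-- maximal run length of c anywhere in the list
def mRun (c : Char) : List Char → Nat
  | [] => 0
  | x :: xs => max (if x = c then leadRun c xs + 1 else 0) (mRun c xs)

-- spec-side mirror of the run values hpAltLoop records for c
def gAux (c : Char) (prev : Option Char) (run : Int) : List Char → Int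
  | [] => 0
  | x :: xs =>
      let run' := if some x = prev then run + 1 else 1
      max (if x = c then run' else 0) (gAux c (some x) run' xs)

theorem mRun_cons (c x : Char) (xs : List Char) :
    mRun c (x :: xs) = max (leadRun c (x :: xs)) (mRun c xs) := by
  simp [mRun, leadRun]

theorem loop_getD (c : Char) : ∀ (l : List Char) (best : PySem.Dict Char Int)
    (prev : Option Char) (run : Int), 0 ≤ run → 0 ≤ best.getD c 0 →
    (hpAltLoop best prev run l).getD c 0 = max (best.getD c 0) (gAux c prev run l) := by
  intro l
  induction l with
  | nil => intro best prev run h0 hb; simp [hpAltLoop, gAux]; omega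
  | cons x xs ih =>
      intro best prev run h0 hb
      simp only [hpAltLoop, gAux]
      set run' : Int := if some x = prev then run + 1 else 1 with hr
      have hr1 : 1 ≤ run' := by rw [hr]; split_ifs <;> omega
      set best' := if run' > best.getD x 0 then best.insert x run' else best with hbd
      have hb' : best'.getD c 0 = max (best.getD c 0) (if x = c then run' else 0) := by
        by_cases hxc : x = c
        · by_cases hgt : run' > best.getD x 0
          · subst hxc; rw [hbd, if_pos hgt, PySem.Dict.getD_insert, if_pos rfl, if_pos rfl]; omega
          · subst hxc; rw [hbd, if_neg hgt, if_pos rfl]; omega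
        · have hcx : ¬ c = x := fun hh => hxc hh.symm
          by_cases hgt : run' > best.getD x 0
          · rw [hbd, if_pos hgt, PySem.Dict.getD_insert, if_neg hcx, if_neg hxc]; omega
          · rw [hbd, if_neg hgt, if_neg hxc]; omega
      have hb0 : 0 ≤ best'.getD c 0 := by rw [hb']; omega
      rw [ih best' (some x) run' (by omega) hb0, hb', max_assoc]

theorem gAux_eq (c : Char) : ∀ (l : List Char) (prev : Option Char) (run : Int), 0 ≤ run →
    gAux c prev run l =
      max (mRun c l : Int)
        (if prev = some c ∧ 0 < leadRun c l then run + (leadRun c l : Int) else 0) := by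
  intro l
  induction l with
  | nil => intro prev run h; simp [gAux, mRun, leadRun]
  | cons x xs ih =>
      intro prev run h
      simp only [gAux]
      set run' : Int := if some x = prev then run + 1 else 1 with hr
      have hr0 : 0 ≤ run' := by rw [hr]; split_ifs <;> omega
      rw [ih (some x) run' hr0, mRun_cons]
      have hlead : leadRun c (x :: xs) = if x = c then leadRun c xs + 1 else 0 := by
        simp [leadRun]
      by_cases hxc : x = c
      · subst hxc
        simp only [hlead, if_true, true_and]
        by_cases hp : prev = some x
        · rw [hr]
          simp only [hp, true_and]
          split_ifs <;> push_cast <;> omega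
        · have hxp : ¬ some x = prev := fun hh => hp hh.symm
          rw [hr]
          simp only [if_neg hxp, if_neg (fun hh => hp hh.1 :
              ¬ (prev = some x ∧ 0 < leadRun x xs + 1))]
          split_ifs <;> push_cast <;> omega
      · simp only [hlead, if_neg hxc]
        have hsc : ¬ (some x = some c ∧ 0 < leadRun c xs) :=
          fun hh => hxc (Option.some.inj hh.1)
        have hpc : ¬ (prev = some c ∧ 0 < (0 : Nat)) :=
          fun hh => absurd hh.2 (lt_irrefl 0)
        simp only [if_neg hsc, if_neg hpc]
        push_cast
        omega

theorem prefix_replicate (c : Char) : ∀ (t : List Char) (k : Nat),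
    List.replicate k c <+: t ↔ k ≤ leadRun c t := by
  intro t
  induction t with
  | nil => intro k; simp [List.prefix_nil, List.replicate_eq_nil_iff, leadRun]
  | cons x xs ih =>
      intro k
      cases k with
      | zero => simp [List.nil_prefix]
      | succ j =>
          rw [List.replicate_succ, List.cons_prefix_cons, ih]
          by_cases hx : x = c
          · subst hx; simp [leadRun]
          · simp only [leadRun, if_neg hx]
            constructor
            · rintro ⟨h, -⟩; exact absurd h.symm hx
            · omega

theorem infix_replicate (c : Char) : ∀ (l : List Char) (k : Nat),
    List.replicate k c <:+: l ↔ k ≤ mRun c l := by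
  intro l
  induction l with
  | nil => intro k; simp [List.infix_nil, List.replicate_eq_nil_iff, mRun]
  | cons x xs ih =>
      intro k
      rw [List.infix_cons_iff, prefix_replicate, ih, mRun_cons, le_max_iff]

theorem isIn_repl (c : Char) (k : Nat) (seq : String) :
    PySem.Str.isIn (String.ofList (List.replicate k c)) seq
      = decide (k ≤ mRun c seq.toList) := by
  have hiff : PySem.Str.isIn (String.ofList (List.replicate k c)) seq = true
      ↔ k ≤ mRun c seq.toList := by
    rw [PySem.Str.isIn_iff_infix, String.toList_ofList, infix_replicate]
  by_cases h : k ≤ mRun c seq.toList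
  · simp only [h, decide_true]; exact hiff.mpr h
  · simp only [h, decide_false, Bool.eq_false_iff]
    exact fun hh => h (hiff.mp hh)

theorem hp_getD (c : Char) (l : List Char) :
    (hpAltLoop PySem.Dict.empty none 0 l).getD c 0 = (mRun c l : Int) := by
  rw [loop_getD c l PySem.Dict.empty none 0 le_rfl (by simp),
      gAux_eq c l none 0 le_rfl]
  simp

-- ===== VERDICT (by name: the statement is the Claim_ definition above) =====
theorem homopolymer_penalty_spec : Claim_equal_homopolymer_penalty := by
  intro seq _
  unfold Spec_homopolymer_penalty homopolymer_penalty homopolymer_penalty_alt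
  rw [show "ATGC".toList = ['A','T','G','C'] from rfl]
  simp only [List.foldl_cons, List.foldl_nil, hp_getD, isIn_repl, ge_iff_le,
    decide_eq_true_eq]
  norm_num
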